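-- pv_equiv track=rewrite | github.com/eliasgranderubio/dagda | check_docker_image.py | parse_rpm_output_list
-- ===== SOURCE A (Python) =====
-- def parse_rpm_output_list(packages_info):
--     package_lines = packages_info.split('\n')
--     counter = 0
--     products = []
--     for line in package_lines:
--         if line.startswith("Name        :") or line.startswith("Version     :"):
--             info = line.split(':')[1].rstrip().lstrip()
--             if counter == 0:
--                 product = info
--                 counter += 1
--             else:
--                 version = info
--                 counter = 0
--                 data = {}
--                 data['product'] = product
--                 data['version'] = version
--                 products.append(data)
--
--     return products
-- ===== SOURCE B (Python) =====
-- def parse_rpm_output_list(packages_info):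
--     values = [line.split(':')[1].strip()
--               for line in packages_info.split('\n')
--               if line.startswith("Name        :") or line.startswith("Version     :")]
--     return [{'product': values[i - 1], 'version': values[i]}
--             for i in range(1, len(values), 2)]
-- ===== Notes on version B (the rewrite author's own statement) =====
-- stated objective: simpler
-- what changed: Replaces the alternating-counter state machine with an extract-then-pair decomposition: one comprehension collects all matching field values, then a second comprehension over range(1, len(values), 2) pairs consecutive values (an unpaired trailing value falls outside the range, matching A's drop).
import Mathlib
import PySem

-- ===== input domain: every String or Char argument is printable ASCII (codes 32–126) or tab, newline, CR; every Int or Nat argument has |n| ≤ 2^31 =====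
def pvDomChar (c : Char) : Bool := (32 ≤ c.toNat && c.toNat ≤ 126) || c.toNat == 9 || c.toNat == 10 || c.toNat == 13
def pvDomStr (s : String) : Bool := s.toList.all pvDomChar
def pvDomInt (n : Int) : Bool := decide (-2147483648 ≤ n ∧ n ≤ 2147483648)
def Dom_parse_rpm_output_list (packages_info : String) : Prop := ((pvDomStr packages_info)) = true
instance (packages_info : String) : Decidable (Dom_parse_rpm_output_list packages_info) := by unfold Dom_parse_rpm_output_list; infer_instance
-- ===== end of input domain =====

-- B replaces A's alternating-counter state machine by a filter/map extraction followed by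
-- index-pairing of consecutive values (objective: a simpler decomposition, same cost).

-- ===== PORT A =====
-- '.getD ""' after pyGet? is unreachable: a line passing the startswith test contains ':',
-- so split(':') has at least two parts and Python's [1] never raises; likewise split('\n')
-- has a nonempty separator, so split? is always 'some'. A is total.
def parse_rpm_output_list (packages_info : String) : List (List (String × String)) :=
  let package_lines := (PySem.Str.split? packages_info "\n").getD []
  (package_lines.foldl (fun st line =>
      if PySem.Str.startswith line "Name        :" || PySem.Str.startswith line "Version     :" then
        let info := PySem.Str.lstrip (PySem.Str.rstrip
          ((PySem.List.pyGet? ((PySem.Str.split? line ":").getD []) 1).getD ""))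
        if st.1 = (0 : Int) then (1, info, st.2.2)
        else (0, st.2.1, st.2.2 ++ [[("product", st.2.1), ("version", info)]])
      else st)
    ((0 : Int), "", ([] : List (List (String × String))))).2.2

-- ===== PORT B =====
def parse_rpm_output_list_alt (packages_info : String) : List (List (String × String)) :=
  let values := (((PySem.Str.split? packages_info "\n").getD []).filter (fun line =>
      PySem.Str.startswith line "Name        :" || PySem.Str.startswith line "Version     :")).map
      (fun line => PySem.Str.strip ((PySem.List.pyGet? ((PySem.Str.split? line ":").getD []) 1).getD ""))
  (PySem.List.pyRange 1 (values.length : Int) 2).map (fun i =>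
    [("product", (PySem.List.pyGet? values (i - 1)).getD ""),
     ("version", (PySem.List.pyGet? values i).getD "")])

-- ===== PRECONDITION & SPEC =====
def Spec_parse_rpm_output_list (packages_info : String) (out : List (List (String × String))) : Prop := out = parse_rpm_output_list_alt packages_info
instance (packages_info : String) (out : List (List (String × String))) : Decidable (Spec_parse_rpm_output_list packages_info out) := by unfold Spec_parse_rpm_output_list; infer_instance

-- ===== CLAIM (what is proved, stated in full; the proofs are below) =====
def Claim_equal_parse_rpm_output_list : Prop := ∀ (packages_info : String), Dom_parse_rpm_output_list packages_info → Spec_parse_rpm_output_list packages_info (parse_rpm_output_list packages_info)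

-- ===== LEMMAS AND PROOFS =====

-- -------- s.rstrip().lstrip() = s.strip(): trimming the two ends commutes --------
lemma rdropWhile_cons' {α : Type} (p : α → Bool) (x : α) (l : List α) :
    List.rdropWhile p (x :: l) =
      if List.rdropWhile p l = [] then (if p x then [] else [x]) else x :: List.rdropWhile p l := by
  simp only [List.rdropWhile, List.reverse_cons, List.dropWhile_append,
    List.isEmpty_iff, List.reverse_eq_nil_iff]
  split_ifs with h₁ h₂ <;> simp_all

lemma rdropWhile_dropWhile_comm {α : Type} (p : α → Bool) (l : List α) :
    List.rdropWhile p (List.dropWhile p l) = List.dropWhile p (List.rdropWhile p l) := by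
  induction l with
  | nil => simp [List.rdropWhile_nil]
  | cons a t ih =>
    by_cases ha : p a
    · rw [List.dropWhile_cons_of_pos ha, ih, rdropWhile_cons']
      by_cases ht : List.rdropWhile p t = []
      · simp [ht, ha]
      · rw [if_neg ht, List.dropWhile_cons_of_pos ha]
    · rw [List.dropWhile_cons_of_neg ha, rdropWhile_cons' p a t]
      by_cases ht : List.rdropWhile p t = []
      · simp [ht, ha]
      · rw [if_neg ht, List.dropWhile_cons_of_neg ha]

lemma strip_eq_lstrip_rstrip (s : String) :
    PySem.Str.lstrip (PySem.Str.rstrip s) = PySem.Str.strip s := by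
  simp only [PySem.Str.strip, PySem.Str.lstrip, PySem.Str.rstrip,
    PySem.Chars.strip, PySem.Chars.lstrip, PySem.Chars.rstrip]
  congr 1
  have h := rdropWhile_dropWhile_comm PySem.Chars.isspace s.toList
  simp only [List.rdropWhile] at h
  simp [h]

-- -------- named versions of the inline pieces of the two ports --------
def pvPred (line : String) : Bool :=
  PySem.Str.startswith line "Name        :" || PySem.Str.startswith line "Version     :"

def pvVal (line : String) : String :=
  PySem.Str.strip ((PySem.List.pyGet? ((PySem.Str.split? line ":").getD []) 1).getD "")

def pvStepA (st : Int × String × List (List (String × String))) (line : String) :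
    Int × String × List (List (String × String)) :=
  if PySem.Str.startswith line "Name        :" || PySem.Str.startswith line "Version     :" then
    let info := PySem.Str.lstrip (PySem.Str.rstrip
      ((PySem.List.pyGet? ((PySem.Str.split? line ":").getD []) 1).getD ""))
    if st.1 = (0 : Int) then (1, info, st.2.2)
    else (0, st.2.1, st.2.2 ++ [[("product", st.2.1), ("version", info)]])
  else st

def pvEntry (vs : List String) (i : Int) : List (String × String) :=
  [("product", (PySem.List.pyGet? vs (i - 1)).getD ""),
   ("version", (PySem.List.pyGet? vs i).getD "")]

-- pairsB: the common shape both ports are reduced to (consecutive pairing, odd tail dropped)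
def pairsB : List String → List (List (String × String))
  | p :: v :: t => [("product", p), ("version", v)] :: pairsB t
  | _ => []

lemma stepA_of_pred {line : String} (h : pvPred line = true)
    (st : Int × String × List (List (String × String))) :
    pvStepA st line =
      if st.1 = (0 : Int) then (1, pvVal line, st.2.2)
      else (0, st.2.1, st.2.2 ++ [[("product", st.2.1), ("version", pvVal line)]]) := by
  simp only [pvStepA, pvPred, pvVal] at *
  rw [if_pos h, strip_eq_lstrip_rstrip]

lemma stepA_of_not_pred {line : String} (h : ¬ pvPred line = true)
    (st : Int × String × List (List (String × String))) : pvStepA st line = st := by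
  simp only [pvStepA, pvPred] at *
  rw [if_neg h]

-- -------- A's loop invariant: the fold, in either counter state, pairs up the values --------
lemma loopA (lines : List String) :
    ∀ (acc : List (List (String × String))) (p : String),
      ((lines.foldl pvStepA (0, p, acc)).2.2
          = acc ++ pairsB ((lines.filter pvPred).map pvVal))
      ∧ ∀ q : String,
          ((lines.foldl pvStepA (1, q, acc)).2.2
              = acc ++ pairsB (q :: (lines.filter pvPred).map pvVal)) := by
  induction lines with
  | nil => intro acc p; simp [pairsB]
  | cons l t ih =>
    intro acc p
    by_cases hl : pvPred l = true
    · constructor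
      · rw [List.foldl_cons, stepA_of_pred hl, if_pos rfl]
        simpa [hl] using ((ih acc p).2 (pvVal l))
      · intro q
        rw [List.foldl_cons, stepA_of_pred hl]
        simp only [show ¬((1 : Int) = 0) by decide, if_false]
        have h1 := (ih (acc ++ [[("product", q), ("version", pvVal l)]]) q).1
        simp only [hl, List.filter_cons_of_pos, List.map_cons]
        rw [show pairsB (q :: pvVal l :: (t.filter pvPred).map pvVal)
              = [("product", q), ("version", pvVal l)] :: pairsB ((t.filter pvPred).map pvVal)
            from rfl]
        simpa using h1
    · constructor
      · rw [List.foldl_cons, stepA_of_not_pred hl]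
        simpa [hl] using (ih acc p).1
      · intro q
        rw [List.foldl_cons, stepA_of_not_pred hl]
        simpa [hl] using ((ih acc p).2 q)

-- -------- B's range-map pairs up the values the same way --------
lemma pyRange_two_cons (a b : Int) (h : a < b) :
    PySem.List.pyRange a b 2 = a :: PySem.List.pyRange (a + 2) b 2 := by
  simp only [PySem.List.pyRange]
  norm_num
  rw [if_pos h]
  have hc : (if a + 2 < b then ((b - (a + 2) + 2 - 1) / 2).toNat else 0) + 1
      = ((b - a + 2 - 1) / 2).toNat := by
    split_ifs with h2 <;> omega
  rw [← hc, List.range_succ_eq_map]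
  simp only [List.map_cons, List.map_map, Nat.cast_zero]
  refine List.cons_eq_cons.mpr ⟨by ring, ?_⟩
  apply List.map_congr_left
  intro k _
  simp only [Function.comp_apply, Nat.cast_succ]
  ring

lemma pyRange_two_shift (a b : Int) :
    PySem.List.pyRange (a + 2) b 2 = (PySem.List.pyRange a (b - 2) 2).map (· + 2) := by
  simp only [PySem.List.pyRange]
  norm_num
  have hc : (if a + 2 < b then ((b - (a + 2) + 2 - 1) / 2).toNat else 0)
      = (if a < b - 2 then ((b - 2 - a + 2 - 1) / 2).toNat else 0) := by
    split_ifs with h1 h2 <;> omega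
  rw [hc]
  apply List.map_congr_left
  intro k _
  simp only [Function.comp_apply]
  ring

lemma pyRange_two_nil (a b : Int) (h : b ≤ a) : PySem.List.pyRange a b 2 = [] := by
  simp only [PySem.List.pyRange]
  norm_num
  intro k
  omega

lemma pvEntry_shift (p v : String) (t : List String) (n : Nat) :
    pvEntry (p :: v :: t) ((n : Int) + 3) = pvEntry t ((n : Int) + 1) := by
  unfold pvEntry
  have h1 : PySem.List.pyGet? (p :: v :: t) ((n : Int) + 3 - 1)
      = PySem.List.pyGet? t ((n : Int) + 1 - 1) := by
    rw [show (n : Int) + 3 - 1 = ((n + 2 : Nat) : Int) by push_cast; ring,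
        show (n : Int) + 1 - 1 = ((n : Nat) : Int) by ring,
        PySem.List.pyGet?_natCast, PySem.List.pyGet?_natCast]
    simp
  have h2 : PySem.List.pyGet? (p :: v :: t) ((n : Int) + 3)
      = PySem.List.pyGet? t ((n : Int) + 1) := by
    rw [show (n : Int) + 3 = ((n + 3 : Nat) : Int) by push_cast; ring,
        show (n : Int) + 1 = ((n + 1 : Nat) : Int) by push_cast; ring,
        PySem.List.pyGet?_natCast, PySem.List.pyGet?_natCast]
    simp
  rw [h1, h2]

lemma mapRange_eq_pairsB (vs : List String) :
    (PySem.List.pyRange 1 (vs.length : Int) 2).map (pvEntry vs) = pairsB vs := by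
  induction vs using pairsB.induct with
  | case1 p v t ih =>
    simp only [List.length_cons]
    rw [show ((t.length + 1 + 1 : Nat) : Int) = (t.length : Int) + 2 by push_cast; ring]
    rw [pyRange_two_cons 1 _ (by omega), show (1 : Int) + 2 = 1 + 2 from rfl, pyRange_two_shift]
    rw [show (t.length : Int) + 2 - 2 = (t.length : Int) by ring]
    simp only [List.map_cons, List.map_map]
    refine List.cons_eq_cons.mpr ⟨?_, ?_⟩
    · unfold pvEntry
      rw [show (1 : Int) - 1 = ((0 : Nat) : Int) by norm_num,
          show (1 : Int) = ((1 : Nat) : Int) by norm_num,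
          PySem.List.pyGet?_natCast, PySem.List.pyGet?_natCast]
      simp
    · rw [← ih]
      apply List.map_congr_left
      intro j hj
      have hjlb : 1 ≤ j := by
        simp only [PySem.List.pyRange] at hj
        norm_num at hj
        obtain ⟨k, -, rfl⟩ := hj
        omega
      obtain ⟨n, rfl⟩ : ∃ n : Nat, j = (n : Int) + 1 := ⟨(j - 1).toNat, by omega⟩
      simp only [Function.comp_apply]
      rw [show (n : Int) + 1 + 2 = (n : Int) + 3 by ring, pvEntry_shift]
  | case2 vs h1 =>
    have hle : vs.length ≤ 1 := by
      match vs, h1 with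
      | [], _ => simp
      | [x], _ => simp
      | p :: v :: t, h => exact absurd rfl (h p v t)
    rw [pyRange_two_nil 1 _ (by omega)]
    match vs, hle with
    | [], _ => rfl
    | [x], _ => rfl

-- ===== VERDICT (by name: the statement is the Claim_ definition above) =====
theorem parse_rpm_output_list_spec : Claim_equal_parse_rpm_output_list := by
  intro s _
  show (List.foldl pvStepA ((0 : Int), "", []) ((PySem.Str.split? s "\n").getD [])).2.2
      = (PySem.List.pyRange 1
            (((((PySem.Str.split? s "\n").getD []).filter pvPred).map pvVal).length : Int) 2).map
          (pvEntry ((((PySem.Str.split? s "\n").getD []).filter pvPred).map pvVal))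
  rw [mapRange_eq_pairsB]
  exact (loopA _ [] "").1
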